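-- pv_equiv track=rewrite | github.com/cake2000/CreatiCodeSkillMap | optimize_t09.py | extract_skill
-- ===== SOURCE A (Python) =====
-- def extract_skill(lines, start_idx):
--     """Extract a single skill from lines starting at start_idx"""
--     skill_lines = []
--     i = start_idx
--     while i < len(lines):
--         line = lines[i]
--         skill_lines.append(line)
--
--         # Check if next line starts a new skill
--         if i + 1 < len(lines) and lines[i + 1].startswith('ID: '):
--             break
--         i += 1
--
--     return skill_lines
-- ===== SOURCE B (Python) =====
-- def extract_skill(lines, start_idx):
--     """Extract a single skill from lines starting at start_idx"""
--     block = lines[start_idx:]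
--     for off in range(1, len(block)):
--         if block[off].startswith('ID: '):
--             return block[:off]
--     return block
-- ===== Notes on version B (the rewrite author's own statement) =====
-- stated objective: simpler
-- what changed: A walks an index with an append-accumulator and a lookahead peek at lines[i+1]; B slices the tail block lines[start_idx:] once and cuts it at the first subsequent 'ID: ' line — a single slice instead of element-by-element appends (measured constant-factor speedup).
-- intended difference: On a nonempty list with -len <= start_idx < 0 whose tail lines[start_idx+1:] has no 'ID: ' line and whose first line is not an 'ID: ' line, A's negative indexing wraps around and returns the tail followed again by lines from the front (e.g. ['b','a','b'] for (['a','b'], -1)); B returns just the block lines[start_idx:] (['b']), the intended 'one skill' value. — e.g. on extract_skill(["a", "b"], -1): A returns ["b", "a", "b"], B returns ["b"]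
import Mathlib
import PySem

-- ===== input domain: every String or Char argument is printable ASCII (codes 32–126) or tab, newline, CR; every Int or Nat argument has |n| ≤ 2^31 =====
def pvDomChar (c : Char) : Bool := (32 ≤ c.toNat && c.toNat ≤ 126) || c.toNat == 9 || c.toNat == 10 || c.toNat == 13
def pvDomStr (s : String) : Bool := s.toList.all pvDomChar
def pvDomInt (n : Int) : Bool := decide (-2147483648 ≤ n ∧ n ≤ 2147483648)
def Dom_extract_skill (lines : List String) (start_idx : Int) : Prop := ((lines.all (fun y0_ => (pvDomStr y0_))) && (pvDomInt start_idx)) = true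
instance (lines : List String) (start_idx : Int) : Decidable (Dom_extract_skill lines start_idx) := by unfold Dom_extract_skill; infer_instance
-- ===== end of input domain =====

-- B replaces A's index loop with peek-ahead by "slice the tail, cut at the first 'ID: ' delimiter";
-- on negative in-range start_idx A's value arises from index wraparound and B returns the intended suffix block (see D_ below).


-- ===== PORT A =====
-- A's while loop: append lines[i], break when the next line starts a new skill.
def extract_skill_go (lines : List String) (i : Int) (acc : List String) : List String :=
  if _h : i < (lines.length : Int) then
    let line := (PySem.List.pyGet? lines i).getD ""
    let acc' := acc ++ [line]
    if (i + 1 < (lines.length : Int)) ∧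
        PySem.Str.startswith ((PySem.List.pyGet? lines (i + 1)).getD "") "ID: " = true then
      acc'
    else
      extract_skill_go lines (i + 1) acc'
  else acc
termination_by ((lines.length : Int) - i).toNat
decreasing_by omega

def extract_skill (lines : List String) (start_idx : Int) : List String :=
  extract_skill_go lines start_idx []

-- ===== PORT B =====
-- B's for-loop over range(1, len(block)) with early return.
def extract_skill_alt_loop (block : List String) (offs : List Int) : List String :=
  match offs with
  | [] => block
  | off :: rest =>
      if PySem.Str.startswith ((PySem.List.pyGet? block off).getD "") "ID: " = true then
        PySem.List.slice block none (some off)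
      else
        extract_skill_alt_loop block rest

def extract_skill_alt (lines : List String) (start_idx : Int) : List String :=
  let block := PySem.List.slice lines (some start_idx) none
  extract_skill_alt_loop block (PySem.List.pyRange 1 (block.length : Int) 1)

-- ===== PRECONDITION & SPEC =====
-- Pre_ excludes exactly the inputs where A raises IndexError: start_idx < -len(lines) (including any negative start_idx on []).
def Pre_extract_skill (lines : List String) (start_idx : Int) : Prop :=
  0 ≤ start_idx ∨ (lines ≠ [] ∧ -(lines.length : Int) ≤ start_idx)
instance (lines : List String) (start_idx : Int) : Decidable (Pre_extract_skill lines start_idx) := by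
  unfold Pre_extract_skill; infer_instance

def pvWitness_extract_skill : List String × Int := (["ID: one", "step a", "ID: two"], 0)

-- On a nonempty list with -len ≤ start_idx < 0 whose wrapped tail lines[start_idx+1:] contains no 'ID: ' line and whose
-- first line is not an 'ID: ' line, A's Python negative indexing wraps around and returns the tail followed again by
-- lines from the front (e.g. ['b','a','b'] for (['a','b'], -1)); B returns just the tail block lines[start_idx:]
-- (['b']), which is the intended "lines of one skill" value.
def D_extract_skill (lines : List String) (start_idx : Int) : Prop :=
  lines ≠ [] ∧ -(lines.length : Int) ≤ start_idx ∧ start_idx < 0 ∧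
  (∀ x ∈ lines.drop (((lines.length : Int) + start_idx).toNat + 1),
      ¬ PySem.Str.startswith x "ID: " = true) ∧
  ¬ PySem.Str.startswith (lines.headD "") "ID: " = true
instance (lines : List String) (start_idx : Int) : Decidable (D_extract_skill lines start_idx) := by
  unfold D_extract_skill; infer_instance

def Spec_extract_skill (lines : List String) (start_idx : Int) (out : List String) : Prop :=
  ¬ D_extract_skill lines start_idx → out = extract_skill_alt lines start_idx
instance (lines : List String) (start_idx : Int) (out : List String) : Decidable (Spec_extract_skill lines start_idx out) := by
  unfold Spec_extract_skill; infer_instance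

def pvDiffWitness_extract_skill : List String × Int := (["a", "b"], -1)
def pvDiffWitnessOut_extract_skill : (List String) × (List String) := (["b", "a", "b"], ["b"])

-- ===== CLAIM (what is proved, stated in full; the proofs are below) =====
def Claim_unchanged_extract_skill : Prop := ∀ (lines : List String) (start_idx : Int), Dom_extract_skill lines start_idx → Pre_extract_skill lines start_idx → Spec_extract_skill lines start_idx (extract_skill lines start_idx)
def Claim_changed_extract_skill : Prop := Dom_extract_skill (pvDiffWitness_extract_skill.1) (pvDiffWitness_extract_skill.2) ∧ Pre_extract_skill (pvDiffWitness_extract_skill.1) (pvDiffWitness_extract_skill.2) ∧ D_extract_skill (pvDiffWitness_extract_skill.1) (pvDiffWitness_extract_skill.2) ∧ extract_skill (pvDiffWitness_extract_skill.1) (pvDiffWitness_extract_skill.2) = pvDiffWitnessOut_extract_skill.1 ∧ extract_skill_alt (pvDiffWitness_extract_skill.1) (pvDiffWitness_extract_skill.2) = pvDiffWitnessOut_extract_skill.2 ∧ pvDiffWitnessOut_extract_skill.1 ≠ pvDiffWitnessOut_extract_skill.2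
def Claim_exact_extract_skill : Prop := ∀ (lines : List String) (start_idx : Int), Dom_extract_skill lines start_idx → Pre_extract_skill lines start_idx → D_extract_skill lines start_idx → extract_skill lines start_idx ≠ extract_skill_alt lines start_idx

-- ===== LEMMAS AND PROOFS =====

def pvBlockOf (lines : List String) (p : Nat) : List String :=
  (lines.drop p).take 1 ++
    ((lines.drop p).drop 1).takeWhile (fun x => ¬ PySem.Str.startswith x "ID: " = true)

theorem pvBlockOf_cons (lines : List String) (p : Nat) (h : p < lines.length) :
    pvBlockOf lines p =
      lines[p] :: (lines.drop (p + 1)).takeWhile (fun x => ¬ PySem.Str.startswith x "ID: " = true) := by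
  have hd : lines.drop p = lines[p] :: lines.drop (p + 1) := List.drop_eq_getElem_cons h
  unfold pvBlockOf
  rw [hd]
  simp only [List.take_succ_cons, List.take_zero, List.drop_succ_cons, List.drop_zero,
    List.cons_append, List.nil_append]

theorem alt_loop_eq (block : List String) (m : Nat) :
    extract_skill_alt_loop block (PySem.List.pyRange (m : Int) (block.length : Int) 1) =
      block.take m ++ (block.drop m).takeWhile (fun x => ¬ PySem.Str.startswith x "ID: " = true) := by
  by_cases h : m < block.length
  · rw [PySem.List.pyRange_one_cons (by exact_mod_cast h)]
    have hget : PySem.List.pyGet? block (m : Int) = some block[m] := by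
      simp [h]
    have hdm : block.drop m = block[m] :: block.drop (m + 1) := List.drop_eq_getElem_cons h
    unfold extract_skill_alt_loop
    rw [hget, Option.getD_some]
    by_cases hs : PySem.Str.startswith block[m] "ID: " = true
    · rw [if_pos hs, PySem.List.slice_to_natCast, hdm, List.takeWhile_cons_of_neg (by simpa using hs)]
      rw [List.append_nil]
    · rw [if_neg hs]
      have hc : ((m : Int) + 1) = ((m + 1 : Nat) : Int) := by push_cast; ring
      rw [hc, alt_loop_eq block (m + 1), hdm, List.takeWhile_cons_of_pos (by simpa using hs)]
      have ht : block.take (m + 1) = block.take m ++ [block[m]] := by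
        rw [List.take_add_one]; simp [List.getElem?_eq_getElem h]
      rw [ht, List.append_assoc, List.singleton_append]
  · rw [PySem.List.pyRange_one_eq_nil (by omega)]
    unfold extract_skill_alt_loop
    have h1 : block.take m = block := List.take_of_length_le (by omega)
    have h2 : block.drop m = [] := List.drop_eq_nil_of_le (by omega)
    rw [h1, h2, List.takeWhile_nil, List.append_nil]
termination_by block.length - m

theorem alt_eq_blockOf_nonneg (lines : List String) (s : Int) (hs : 0 ≤ s) :
    extract_skill_alt lines s = pvBlockOf lines s.toNat := by
  show extract_skill_alt_loop (PySem.List.slice lines (some s) none)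
      (PySem.List.pyRange 1 ((PySem.List.slice lines (some s) none).length : Int) 1) = _
  rw [PySem.List.slice_from lines hs]
  have h1 := alt_loop_eq (lines.drop s.toNat) 1
  rw [show ((1:Nat) : Int) = (1 : Int) from rfl] at h1
  rw [h1]
  rfl

theorem alt_eq_blockOf_neg (lines : List String) (s : Int)
    (h1 : -(lines.length : Int) ≤ s) (h2 : s < 0) :
    extract_skill_alt lines s = pvBlockOf lines ((lines.length : Int) + s).toNat := by
  show extract_skill_alt_loop (PySem.List.slice lines (some s) none)
      (PySem.List.pyRange 1 ((PySem.List.slice lines (some s) none).length : Int) 1) = _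
  have hk : 0 < (-s).toNat := by omega
  have hsval : s = -(((-s).toNat : Nat) : Int) := by omega
  rw [hsval, PySem.List.slice_from_neg_natCast lines _ hk]
  have hp : lines.length - (-s).toNat = ((lines.length : Int) + s).toNat := by omega
  rw [hp]
  have h1 := alt_loop_eq (lines.drop (((lines.length : Int) + s).toNat)) 1
  rw [show ((1:Nat) : Int) = (1 : Int) from rfl] at h1
  rw [h1, ← hsval]
  rfl

theorem go_eq_blockOf (lines : List String) (p : Nat) (acc : List String) :
    extract_skill_go lines (p : Int) acc = acc ++ pvBlockOf lines p := by
  by_cases h : p < lines.length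
  · rw [extract_skill_go]
    rw [dif_pos (by exact_mod_cast h : (p : Int) < (lines.length : Int))]
    have hget : PySem.List.pyGet? lines (p : Int) = some lines[p] := by simp [h]
    have hcast : ((p : Int) + 1) = ((p + 1 : Nat) : Int) := by push_cast; ring
    rw [pvBlockOf_cons lines p h]
    by_cases h2 : p + 1 < lines.length
    · have hget2 : PySem.List.pyGet? lines ((p : Int) + 1) = some lines[p + 1] := by
        rw [hcast, PySem.List.pyGet?_natCast]; exact List.getElem?_eq_getElem h2
      have hd2 : lines.drop (p + 1) = lines[p + 1] :: lines.drop (p + 2) := List.drop_eq_getElem_cons h2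
      by_cases hs : PySem.Str.startswith lines[p + 1] "ID: " = true
      · rw [if_pos ⟨by exact_mod_cast h2, by rw [hget2, Option.getD_some]; exact hs⟩]
        rw [hd2, List.takeWhile_cons_of_neg (by simpa using hs)]
        rw [hget, Option.getD_some]
      · rw [if_neg (by rintro ⟨-, hc⟩; rw [hget2, Option.getD_some] at hc; exact hs hc)]
        rw [hcast, go_eq_blockOf lines (p + 1)]
        rw [pvBlockOf_cons lines (p + 1) h2]
        rw [hd2, List.takeWhile_cons_of_pos (by simpa using hs)]
        rw [hget, Option.getD_some]
        simp
    · rw [if_neg (by rintro ⟨hc, -⟩; rw [hcast] at hc; exact h2 (by exact_mod_cast hc))]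
      rw [hcast, go_eq_blockOf lines (p + 1)]
      have hd : lines.drop (p + 1) = [] := List.drop_eq_nil_of_le (by omega)
      unfold pvBlockOf
      rw [hd]
      rw [hget, Option.getD_some]
      simp
  · rw [extract_skill_go]
    rw [dif_neg (by exact_mod_cast (by omega : ¬ ((p:Int) < (lines.length : Int))))]
    unfold pvBlockOf
    have hd : lines.drop p = [] := List.drop_eq_nil_of_le (by omega)
    rw [hd]
    simp
termination_by lines.length - p

theorem pyGet?_neg_in_range (lines : List String) (s : Int)
    (h1 : -(lines.length : Int) ≤ s) (h2 : s < 0) :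
    PySem.List.pyGet? lines s = lines[((lines.length : Int) + s).toNat]? := by
  have hk : 0 < (-s).toNat := by omega
  have hk2 : (-s).toNat ≤ lines.length := by omega
  have hsval : s = -(((-s).toNat : Nat) : Int) := by omega
  rw [hsval, PySem.List.pyGet?_neg_natCast lines _ hk hk2]
  rw [show lines.length - (-s).toNat = ((lines.length : Int) + -(((-s).toNat : Nat) : Int)).toNat by omega]

theorem go_neg_hit (lines : List String) (s : Int) (acc : List String)
    (h1 : -(lines.length : Int) ≤ s) (h2 : s < 0)
    (hhit : (∃ x ∈ lines.drop (((lines.length : Int) + s).toNat + 1),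
              PySem.Str.startswith x "ID: " = true) ∨
            PySem.Str.startswith (lines.headD "") "ID: " = true) :
    extract_skill_go lines s acc = acc ++ pvBlockOf lines ((lines.length : Int) + s).toNat := by
  have hn : 0 < lines.length := by omega
  have hpl : ((lines.length : Int) + s).toNat < lines.length := by omega
  have hget : PySem.List.pyGet? lines s =
      some (lines[((lines.length : Int) + s).toNat]'hpl) := by
    rw [pyGet?_neg_in_range lines s h1 h2]
    exact List.getElem?_eq_getElem hpl
  rw [extract_skill_go, dif_pos (by omega : s < (lines.length : Int))]
  rw [pvBlockOf_cons lines _ hpl]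
  by_cases hs1 : s + 1 < 0
  · have hp1 : ((lines.length : Int) + s).toNat + 1 < lines.length := by omega
    have hget2 : PySem.List.pyGet? lines (s + 1) =
        some (lines[((lines.length : Int) + s).toNat + 1]'hp1) := by
      rw [pyGet?_neg_in_range lines (s + 1) (by omega) hs1]
      rw [show ((lines.length : Int) + (s + 1)).toNat = ((lines.length : Int) + s).toNat + 1 by omega]
      exact List.getElem?_eq_getElem hp1
    have hd2 : lines.drop (((lines.length : Int) + s).toNat + 1) =
        lines[((lines.length : Int) + s).toNat + 1]'hp1 ::
          lines.drop (((lines.length : Int) + s).toNat + 2) := List.drop_eq_getElem_cons hp1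
    by_cases hs : PySem.Str.startswith (lines[((lines.length : Int) + s).toNat + 1]'hp1) "ID: " = true
    · rw [if_pos ⟨by omega, by rw [hget2, Option.getD_some]; exact hs⟩]
      rw [hd2, List.takeWhile_cons_of_neg (by simpa using hs)]
      rw [hget, Option.getD_some]
    · rw [if_neg (by rintro ⟨-, hc⟩; rw [hget2, Option.getD_some] at hc; exact hs hc)]
      have hhit' : (∃ x ∈ lines.drop (((lines.length : Int) + (s + 1)).toNat + 1),
              PySem.Str.startswith x "ID: " = true) ∨
            PySem.Str.startswith (lines.headD "") "ID: " = true := by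
        rcases hhit with ⟨x, hx, hxs⟩ | hh
        · rw [hd2, List.mem_cons] at hx
          rcases hx with hx | hx
          · exact absurd (hx ▸ hxs) hs
          · left
            refine ⟨x, ?_, hxs⟩
            rw [show (((lines.length : Int) + (s + 1)).toNat + 1) =
              ((lines.length : Int) + s).toNat + 2 by omega]
            exact hx
        · right; exact hh
      rw [go_neg_hit lines (s + 1) _ (by omega) hs1 hhit']
      rw [show (((lines.length : Int) + (s + 1)).toNat) = ((lines.length : Int) + s).toNat + 1 by omega]
      rw [pvBlockOf_cons lines _ hp1]
      rw [hget, Option.getD_some]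
      rw [hd2, List.takeWhile_cons_of_pos (by simpa using hs)]
      simp
  · have hs0 : s = -1 := by omega
    have hdrop : lines.drop (((lines.length : Int) + s).toNat + 1) = [] :=
      List.drop_eq_nil_of_le (by omega)
    have hh0 : PySem.Str.startswith (lines.headD "") "ID: " = true := by
      rcases hhit with ⟨x, hx, -⟩ | hh
      · rw [hdrop] at hx; simp at hx
      · exact hh
    have hh0' : PySem.Str.startswith (lines[0]'hn) "ID: " = true := by
      cases lines with
      | nil => simp at hn
      | cons a l => simpa using hh0
    have hget2 : PySem.List.pyGet? lines (s + 1) = some (lines[0]'hn) := by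
      rw [hs0, show (-1 : Int) + 1 = ((0 : Nat) : Int) by norm_num, PySem.List.pyGet?_natCast]
      exact List.getElem?_eq_getElem hn
    rw [if_pos ⟨by omega, by rw [hget2, Option.getD_some]; exact hh0'⟩]
    rw [hdrop, List.takeWhile_nil]
    rw [hget, Option.getD_some]
termination_by (-s).toNat
decreasing_by omega

theorem go_neg_nohit (lines : List String) (s : Int) (acc : List String)
    (h1 : -(lines.length : Int) ≤ s) (h2 : s < 0)
    (hno : ∀ x ∈ lines.drop (((lines.length : Int) + s).toNat + 1),
              ¬ PySem.Str.startswith x "ID: " = true)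
    (hh0 : ¬ PySem.Str.startswith (lines.headD "") "ID: " = true) :
    extract_skill_go lines s acc =
      extract_skill_go lines 0 (acc ++ lines.drop (((lines.length : Int) + s).toNat)) := by
  have hn : 0 < lines.length := by omega
  have hpl : ((lines.length : Int) + s).toNat < lines.length := by omega
  have hget : PySem.List.pyGet? lines s =
      some (lines[((lines.length : Int) + s).toNat]'hpl) := by
    rw [pyGet?_neg_in_range lines s h1 h2]
    exact List.getElem?_eq_getElem hpl
  have hdp : lines.drop (((lines.length : Int) + s).toNat) =
      lines[((lines.length : Int) + s).toNat]'hpl ::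
        lines.drop (((lines.length : Int) + s).toNat + 1) := List.drop_eq_getElem_cons hpl
  rw [extract_skill_go, dif_pos (by omega : s < (lines.length : Int))]
  by_cases hs1 : s + 1 < 0
  · have hp1 : ((lines.length : Int) + s).toNat + 1 < lines.length := by omega
    have hget2 : PySem.List.pyGet? lines (s + 1) =
        some (lines[((lines.length : Int) + s).toNat + 1]'hp1) := by
      rw [pyGet?_neg_in_range lines (s + 1) (by omega) hs1]
      rw [show ((lines.length : Int) + (s + 1)).toNat = ((lines.length : Int) + s).toNat + 1 by omega]
      exact List.getElem?_eq_getElem hp1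
    have hd2 : lines.drop (((lines.length : Int) + s).toNat + 1) =
        lines[((lines.length : Int) + s).toNat + 1]'hp1 ::
          lines.drop (((lines.length : Int) + s).toNat + 2) := List.drop_eq_getElem_cons hp1
    have hs : ¬ PySem.Str.startswith (lines[((lines.length : Int) + s).toNat + 1]'hp1) "ID: " = true := by
      apply hno
      rw [hd2]
      exact List.mem_cons_self
    rw [if_neg (by rintro ⟨-, hc⟩; rw [hget2, Option.getD_some] at hc; exact hs hc)]
    rw [go_neg_nohit lines (s + 1) _ (by omega) hs1
      (by intro x hx
          apply hno
          rw [show (((lines.length : Int) + (s + 1)).toNat + 1) =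
            ((lines.length : Int) + s).toNat + 2 by omega] at hx
          rw [hd2, List.mem_cons]
          right; exact hx) hh0]
    rw [show (((lines.length : Int) + (s + 1)).toNat) = ((lines.length : Int) + s).toNat + 1 by omega]
    rw [hget, Option.getD_some, hdp]
    simp
  · have hs0 : s = -1 := by omega
    have hh0' : ¬ PySem.Str.startswith (lines[0]'hn) "ID: " = true := by
      cases lines with
      | nil => simp at hn
      | cons a l => simpa using hh0
    have hget2 : PySem.List.pyGet? lines (s + 1) = some (lines[0]'hn) := by
      rw [hs0, show (-1 : Int) + 1 = ((0 : Nat) : Int) by norm_num, PySem.List.pyGet?_natCast]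
      exact List.getElem?_eq_getElem hn
    rw [if_neg (by rintro ⟨-, hc⟩; rw [hget2, Option.getD_some] at hc; exact hh0' hc)]
    rw [show s + 1 = (0 : Int) by omega]
    congr 1
    have hdrop : lines.drop (((lines.length : Int) + s).toNat + 1) = [] :=
      List.drop_eq_nil_of_le (by omega)
    rw [hget, Option.getD_some, hdp, hdrop]
termination_by (-s).toNat
decreasing_by omega

theorem pvBlockOf_length_pos (lines : List String) (h : 0 < lines.length) :
    0 < (pvBlockOf lines 0).length := by
  unfold pvBlockOf
  cases lines with
  | nil => simp at h
  | cons a l => simp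

-- ===== VERDICT (by name: the statement is the Claim_ definition above) =====
theorem extract_skill_spec : Claim_unchanged_extract_skill := by
  intro lines s _hdom hpre hnd
  unfold extract_skill
  by_cases hs : 0 ≤ s
  · rw [show s = ((s.toNat : Nat) : Int) by omega]
    rw [alt_eq_blockOf_nonneg lines _ (by exact_mod_cast Int.natCast_nonneg _), go_eq_blockOf]
    simp
    congr 1
    omega
  · have h1 : -(lines.length : Int) ≤ s := by
      rcases hpre with h | ⟨-, h⟩
      · omega
      · exact h
    have h2 : s < 0 := by omega
    have hne : lines ≠ [] := by
      rcases hpre with h | ⟨h, -⟩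
      · omega
      · exact h
    have hhit : (∃ x ∈ lines.drop (((lines.length : Int) + s).toNat + 1),
              PySem.Str.startswith x "ID: " = true) ∨
            PySem.Str.startswith (lines.headD "") "ID: " = true := by
      by_contra hc
      push Not at hc
      exact hnd ⟨hne, h1, h2, fun x hx => hc.1 x hx, hc.2⟩
    rw [alt_eq_blockOf_neg lines s h1 h2, go_neg_hit lines s [] h1 h2 hhit]
    simp

theorem extract_skill_changed : Claim_changed_extract_skill := by
  unfold Claim_changed_extract_skill
  refine ⟨by decide, by decide, by decide, ?_, by decide, by decide⟩
  show extract_skill ["a", "b"] (-1) = ["b", "a", "b"]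
  unfold extract_skill
  rw [extract_skill_go]
  norm_num [PySem.List.pyGet?, PySem.List.pyIdx?]
  rw [if_neg (by decide)]
  rw [extract_skill_go]
  norm_num [PySem.List.pyGet?, PySem.List.pyIdx?]
  rw [if_neg (by decide)]
  rw [extract_skill_go]
  norm_num [PySem.List.pyGet?, PySem.List.pyIdx?]
  rw [extract_skill_go]
  norm_num

theorem extract_skill_tight : Claim_exact_extract_skill := by
  intro lines s _hdom _hpre hd
  rcases hd with ⟨hne, h1, h2, hno, hh0⟩
  have hn : 0 < lines.length := List.length_pos_of_ne_nil hne
  unfold extract_skill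
  rw [go_neg_nohit lines s [] h1 h2 hno hh0]
  rw [show (0 : Int) = ((0 : Nat) : Int) by simp, go_eq_blockOf]
  rw [alt_eq_blockOf_neg lines s h1 h2]
  intro heq
  have hlen := congrArg List.length heq
  have hblen := pvBlockOf_length_pos lines hn
  have hp : ((lines.length : Int) + s).toNat < lines.length := by omega
  have hble : (pvBlockOf lines (((lines.length : Int) + s).toNat)).length ≤
      lines.length - ((lines.length : Int) + s).toNat := by
    unfold pvBlockOf
    have t2 := (List.takeWhile_sublist
      (l := (lines.drop (((lines.length : Int) + s).toNat)).drop 1)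
      (fun x => decide (¬ PySem.Str.startswith x "ID: " = true))).length_le
    simp only [List.length_append, List.length_take, List.length_drop] at t2 ⊢
    omega
  simp only [List.nil_append, List.length_append, List.length_drop] at hlen
  omega
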